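-- pv_equiv track=rewrite | github.com/greb/aoc2024 | days/day19.py | parse
-- ===== SOURCE A (Python) =====
-- import functools
--
-- def parse(inp):
--     towels, designs = inp.split('\n\n')
--     towels = towels.split(', ')
--     designs = designs.splitlines()
--
--     @functools.cache
--     def count(design):
--         if design == '':
--             return 1
--         cnt = 0
--         for towel in towels:
--             if design.startswith(towel):
--                 cnt += count(design[len(towel):])
--         return cnt
--     return [count(d) for d in designs]
-- ===== SOURCE B (Python) =====
-- def parse(inp):
--     towels, designs = inp.split('\n\n')
--     towels = towels.split(', ')
--     result = []
--     for design in designs.splitlines():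
--         dp = [1]  # dp[k] = number of towel compositions of the length-k suffix
--         for i in range(len(design) - 1, -1, -1):
--             suffix = design[i:]
--             dp.append(sum(dp[len(suffix) - len(t)]
--                           for t in towels if suffix.startswith(t)))
--         result.append(dp[-1])
--     return result
-- ===== Notes on version B (the rewrite author's own statement) =====
-- stated objective: alternative
-- what changed: Replaces the memoized top-down suffix recursion with an explicit bottom-up DP table built back-to-front (dp[k] = number of towel compositions of the length-k suffix), no recursion and no cache.
import Mathlib
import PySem

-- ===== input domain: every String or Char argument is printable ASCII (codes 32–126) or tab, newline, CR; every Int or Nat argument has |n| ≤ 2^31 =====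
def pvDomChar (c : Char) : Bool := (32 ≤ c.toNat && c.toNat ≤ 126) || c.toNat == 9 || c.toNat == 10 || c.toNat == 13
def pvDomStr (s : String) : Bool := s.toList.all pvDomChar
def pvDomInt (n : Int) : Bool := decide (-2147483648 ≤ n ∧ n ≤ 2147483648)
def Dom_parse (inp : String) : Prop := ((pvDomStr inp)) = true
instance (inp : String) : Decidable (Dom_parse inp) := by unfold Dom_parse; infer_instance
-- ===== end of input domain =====

-- B replaces A's memoized suffix recursion by an iterative suffix DP table; return values only (A mutates nothing).

-- ===== PORT A =====
-- A's @functools.cache memoized recursion 'count'; the cache only affects speed, the fuel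
-- argument (always > |design|) and the 't ≠ []' guard only make the recursion total in Lean
-- (in Python an empty towel with a nonempty design never returns: RecursionError, outside Pre_).
def countA (towels : List (List Char)) : Nat → List Char → Int
  | 0, _ => 0
  | fuel + 1, design =>
    if design = [] then 1
    else towels.foldl (fun cnt t =>
      if PySem.Chars.startswith design t = true ∧ t ≠ []
      then cnt + countA towels fuel (design.drop t.length) else cnt) 0

def parse (inp : String) : List Int :=
  let parts := PySem.Chars.splitOn inp.toList ['\n', '\n']
  if parts.length = 2 then   -- Python: ValueError on unpacking otherwise; outside Pre_
    let towels := PySem.Chars.splitOn (parts.getD 0 []) [',', ' ']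
    (PySem.Chars.splitlines (parts.getD 1 [])).map (fun d => countA towels (d.length + 1) d)
  else []

-- ===== PORT B =====
def dpAlt (towels : List (List Char)) (design : List Char) : Int :=
  let dp := (PySem.List.pyRange ((design.length : Int) - 1) (-1) (-1)).foldl
    (fun dp i =>
      let suffix := PySem.List.slice design (some i) none
      dp ++ [towels.foldl
        (fun s t => if PySem.Chars.startswith suffix t = true
                    then s + PySem.List.pyGetD dp ((suffix.length : Int) - (t.length : Int)) 0
                    else s) 0]) [1]
  PySem.List.pyGetD dp (-1) 0

def parse_alt (inp : String) : List Int :=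
  let parts := PySem.Chars.splitOn inp.toList ['\n', '\n']
  if parts.length = 2 then
    let towels := PySem.Chars.splitOn (parts.getD 0 []) [',', ' ']
    (PySem.Chars.splitlines (parts.getD 1 [])).map (fun d => dpAlt towels d)
  else []

-- ===== PRECONDITION & SPEC =====
-- Pre_ excludes exactly the inputs where the Python A raises: input not split by the
-- blank-line separator into exactly two parts (ValueError on unpacking), or an empty towel
-- together with a nonempty design (unbounded recursion, RecursionError).
def Pre_parse (inp : String) : Prop :=
  (PySem.Chars.splitOn inp.toList ['\n', '\n']).length = 2 ∧
  ∀ d ∈ PySem.Chars.splitlines ((PySem.Chars.splitOn inp.toList ['\n', '\n']).getD 1 []),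
    d ≠ [] →
    ∀ t ∈ PySem.Chars.splitOn ((PySem.Chars.splitOn inp.toList ['\n', '\n']).getD 0 []) [',', ' '],
      t ≠ []
instance (inp : String) : Decidable (Pre_parse inp) := by unfold Pre_parse; infer_instance

def pvWitness_parse : String := "r, b, rb\n\nrbr\nb"

def Spec_parse (inp : String) (out : List Int) : Prop := out = parse_alt inp
instance (inp : String) (out : List Int) : Decidable (Spec_parse inp out) := by unfold Spec_parse; infer_instance

-- ===== CLAIM (what is proved, stated in full; the proofs are below) =====
def Claim_equal_parse : Prop := ∀ (inp : String), Dom_parse inp → Pre_parse inp → Spec_parse inp (parse inp)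

-- ===== LEMMAS AND PROOFS =====

theorem countA_fuel (towels : List (List Char)) :
    ∀ (n : Nat) (s : List Char), s.length ≤ n → ∀ f g, s.length < f → s.length < g →
      countA towels f s = countA towels g s := by
  intro n
  induction n with
  | zero =>
    intro s hs f g hf hg
    have hsnil : s = [] := List.eq_nil_of_length_eq_zero (Nat.le_zero.mp hs)
    subst hsnil
    match f, g, hf, hg with
    | f + 1, g + 1, _, _ => simp [countA]
  | succ n ih =>
    intro s hs f g hf hg
    match f, g, hf, hg with
    | f + 1, g + 1, hf, hg =>
      by_cases hnil : s = []
      · simp [countA, hnil]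
      · simp only [countA, if_neg hnil]
        apply PySem.List.foldl_congr_mem
        intro acc t hmem
        by_cases hc : PySem.Chars.startswith s t = true ∧ t ≠ []
        · simp only [if_pos hc]
          have htlen : 0 < t.length := List.length_pos_iff.mpr hc.2
          have hslen : 0 < s.length := List.length_pos_iff.mpr hnil
          have : (s.drop t.length).length = s.length - t.length := List.length_drop ..
          rw [ih (s.drop t.length) (by omega) f g (by omega) (by omega)]
        · simp only [if_neg hc]

-- the DP table: entry k is the count for the length-k suffix of design
def tbl (towels : List (List Char)) (design : List Char) (L : Nat) : List Int :=
  (List.range (L + 1)).map (fun k => countA towels (k + 1) (design.drop (design.length - k)))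

theorem tbl_step (towels : List (List Char)) (design : List Char)
    (ht : ∀ t ∈ towels, t ≠ []) (i : Nat) (hi : i < design.length) :
    tbl towels design (design.length - 1 - i) ++
      [towels.foldl (fun s t => if PySem.Chars.startswith (design.drop i) t = true
          then s + PySem.List.pyGetD (tbl towels design (design.length - 1 - i))
                 (((design.drop i).length : Int) - (t.length : Int)) 0
          else s) 0]
    = tbl towels design (design.length - i) := by
  have hsplit : design.length - i = (design.length - 1 - i) + 1 := by omega
  conv_rhs => rw [hsplit]
  rw [show tbl towels design ((design.length - 1 - i) + 1)
      = tbl towels design (design.length - 1 - i) ++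
        [countA towels ((design.length - i) + 1)
          (design.drop (design.length - (design.length - i)))] by
    simp only [tbl, List.range_succ, List.map_append, List.map_cons, List.map_nil]
    rw [← hsplit]]
  congr 1
  have hdropi : design.length - (design.length - i) = i := by omega
  rw [hdropi]
  have hlen : (design.drop i).length = design.length - i := List.length_drop ..
  have hne : design.drop i ≠ [] := by
    intro h; have := congrArg List.length h; simp [hlen] at this; omega
  rw [show (design.length - i) + 1 = (design.length - i) + 1 from rfl]
  simp only [countA, if_neg hne]
  congr 1
  apply PySem.List.foldl_congr_mem
  intro acc t hmem
  have htne : t ≠ [] := ht t hmem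
  by_cases hsw : PySem.Chars.startswith (design.drop i) t = true
  · simp only [if_pos hsw, if_pos (And.intro hsw htne)]
    congr 1
    have hpre : t <+: design.drop i := (PySem.Chars.startswith_iff _ _).mp hsw
    have htle : t.length ≤ design.length - i := by
      have := hpre.length_le; omega
    have htpos : 0 < t.length := List.length_pos_iff.mpr htne
    set k : Nat := design.length - i - t.length with hk
    have hidx : ((design.drop i).length : Int) - (t.length : Int) = (k : Int) := by
      rw [hlen]; omega
    rw [hidx, PySem.List.pyGetD_natCast]
    have hklt : k < (design.length - 1 - i) + 1 := by omega
    rw [show (tbl towels design (design.length - 1 - i)).getD k 0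
        = countA towels (k + 1) (design.drop (design.length - k)) by
      simp only [tbl]
      rw [List.getD_eq_getElem?_getD, List.getElem?_map, List.getElem?_range hklt]
      rfl]
    have hnk : design.length - k = i + t.length := by omega
    rw [hnk, ← List.drop_drop]
    apply countA_fuel towels ((design.drop i).drop t.length).length _ le_rfl
    · simp; omega
    · simp; omega
  · simp only [if_neg hsw]
    have : ¬ (PySem.Chars.startswith (design.drop i) t = true ∧ t ≠ []) := by
      intro h; exact hsw h.1
    simp only [if_neg this]

theorem tbl_loop (towels : List (List Char)) (design : List Char)
    (ht : ∀ t ∈ towels, t ≠ []) :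
    ∀ i, i < design.length →
    (PySem.List.pyRange (i : Int) (-1) (-1)).foldl
      (fun dp j =>
        let suffix := PySem.List.slice design (some j) none
        dp ++ [towels.foldl
          (fun s t => if PySem.Chars.startswith suffix t = true
            then s + PySem.List.pyGetD dp ((suffix.length : Int) - (t.length : Int)) 0
            else s) 0])
      (tbl towels design (design.length - 1 - i))
    = tbl towels design design.length := by
  intro i
  induction i with
  | zero =>
    intro hi
    simp only [Nat.cast_zero]
    rw [PySem.List.pyRange_neg_one_cons (by norm_num : (-1 : Int) < 0),
        PySem.List.pyRange_neg_one_eq_nil (by norm_num : (0 : Int) - 1 ≤ -1)]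
    simp only [List.foldl_cons, List.foldl_nil]
    rw [show PySem.List.slice design (some (0 : Int)) none = design.drop 0 from
      PySem.List.slice_from_natCast (a := 0) (xs := design)]
    have := tbl_step towels design ht 0 hi
    simpa using this
  | succ n ih =>
    intro hi
    rw [show ((n + 1 : Nat) : Int) = ((n : Int) + 1) by push_cast; ring]
    rw [PySem.List.pyRange_neg_one_cons (by omega : (-1 : Int) < (n : Int) + 1)]
    simp only [List.foldl_cons]
    rw [show ((n : Int) + 1) - 1 = (n : Int) by ring]
    rw [show PySem.List.slice design (some ((n : Int) + 1)) none = design.drop (n + 1) by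
      rw [show ((n : Int) + 1) = ((n + 1 : Nat) : Int) by push_cast; ring]
      exact PySem.List.slice_from_natCast (a := n + 1) (xs := design)]
    have hstep := tbl_step towels design ht (n + 1) hi
    rw [hstep]
    rw [show design.length - (n + 1) = design.length - 1 - n by omega]
    exact ih (by omega)

theorem dpAlt_eq_countA (towels : List (List Char)) (design : List Char)
    (ht : design ≠ [] → ∀ t ∈ towels, t ≠ []) :
    dpAlt towels design = countA towels (design.length + 1) design := by
  by_cases hnil : design = []
  · subst hnil
    simp only [dpAlt, List.length_nil, Nat.cast_zero]
    rw [PySem.List.pyRange_neg_one_eq_nil (by norm_num : (0 : Int) - 1 ≤ -1)]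
    simp only [countA, List.foldl_nil, if_true]
    decide
  · have hpos : 0 < design.length := List.length_pos_iff.mpr hnil
    have ht' := ht hnil
    unfold dpAlt
    rw [show ((design.length : Int) - 1) = ((design.length - 1 : Nat) : Int) by omega]
    have hinit : tbl towels design (design.length - 1 - (design.length - 1)) = [1] := by
      simp only [tbl, Nat.sub_self, List.range_succ, List.range_zero, List.nil_append,
        List.map_cons, List.map_nil, Nat.sub_zero, List.drop_length]
      simp [countA]
    rw [show ([(1 : Int)]) = tbl towels design (design.length - 1 - (design.length - 1)) from
      hinit.symm]
    rw [tbl_loop towels design ht' (design.length - 1) (by omega)]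
    have hsplit : tbl towels design design.length
        = (List.range design.length).map
            (fun k => countA towels (k + 1) (design.drop (design.length - k)))
          ++ [countA towels (design.length + 1) (design.drop (design.length - design.length))] := by
      simp only [tbl, List.range_succ, List.map_append, List.map_cons, List.map_nil]
    rw [hsplit, PySem.List.pyGetD_neg_one_append_singleton]
    simp

-- ===== VERDICT (by name: the statement is the Claim_ definition above) =====
theorem parse_spec : Claim_equal_parse := by
  intro inp _ hpre
  obtain ⟨hlen, hne⟩ := hpre
  unfold Spec_parse
  simp only [parse, parse_alt, if_pos hlen]
  apply List.map_congr_left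
  intro d hd
  exact (dpAlt_eq_countA _ d (fun hdne t htm => hne d hd hdne t htm)).symm
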